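-- pv_equiv track=rewrite | github.com/dave3680/CS2006 | code/distorted_ints.py | HasDistortedIdempotentProperty
-- ===== SOURCE A (Python) =====
-- class DistortedInt:
--     """Class to hold one distorted integer"""
--
--     def __init__(self, x, n, a):
--         """new distorted int
--         arguments must be integers
--         n must be positive"""
--         # check types of args
--         if type(x) != int or type(a) != int or type(n) != int:
--             raise TypeError("arguments of DistortedInt must be integers")
--         # check n > 0
--         if n <= 0:
--             raise ValueError("n must be positive")
--         # if ok, setup val, take mod n in case out of bounds
--         self.x = x % n
--         self.a = a % n
--         self.n = n
--
--     def __str__(self):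
--         """turn distorted int into a string
--         <x mod n | a>"""
--         return "<" + str(self.x) + " mod " + str(self.n) + " | " + str(self.a) + ">"
--
--     def __repr__(self):
--         """return representation of object
--         same as to string method"""
--         return str(self)
--
--     def __mul__(self, other):
--         """apply distorted multiplication
--         x * y = (ax + (1 - a)y) mod n
--         a and n must be same for both arguments"""
--         # check a, n same
--         if self.a != other.a or self.n != other.n:
--             raise ValueError("a and n of both arguments must be equal")
--         # new x = (ax + (1-a)y) mod n
--         x = ((self.a * self.x) + ((1 - self.a) * other.x))
--         return DistortedInt(x, self.n, self.a)
--
--     def __eq__(self, other):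
--         """Check if this object is equal to another
--         Compares x, a and n"""
--         return self.x == other.x and self.a == other.a and self.n == other.n
--
-- def HasDistortedIdempotentProperty(n, alpha):
--     """Tests if (x*x) = x for all x in Zn n > 0"""
--     if n <= 0:
--         raise ValueError("n must be greater than 0")
--     for x in range(n):
--              xdi = DistortedInt(x, n, alpha)
--              if (xdi * xdi != xdi):
--                     return False
--     return True
-- ===== SOURCE B (Python) =====
-- def HasDistortedIdempotentProperty(n, alpha):
--     """x*x = (a*x + (1-a)*x) mod n = x mod n = x for every x in Zn,
--     so the distorted idempotent property always holds; just validate n."""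
--     if n <= 0:
--         raise ValueError("n must be greater than 0")
--     return True
-- ===== Notes on version B (the rewrite author's own statement) =====
-- stated objective: faster
-- what changed: B replaces the O(n) scan of Zn by the algebraic identity a*x+(1-a)*x = x, so after validating n>0 it returns True in O(1).
import Mathlib
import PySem

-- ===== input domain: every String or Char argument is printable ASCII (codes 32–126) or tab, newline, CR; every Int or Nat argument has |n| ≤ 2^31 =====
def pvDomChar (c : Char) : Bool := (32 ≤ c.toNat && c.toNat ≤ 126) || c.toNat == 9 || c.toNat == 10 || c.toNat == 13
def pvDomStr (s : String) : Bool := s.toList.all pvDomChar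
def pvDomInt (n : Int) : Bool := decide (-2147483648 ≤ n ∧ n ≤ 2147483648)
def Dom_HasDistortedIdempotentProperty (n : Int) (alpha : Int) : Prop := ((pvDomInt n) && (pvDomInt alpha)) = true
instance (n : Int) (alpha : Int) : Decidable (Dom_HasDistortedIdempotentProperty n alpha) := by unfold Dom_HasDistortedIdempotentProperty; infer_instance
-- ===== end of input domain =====

-- B replaces A's O(n) scan of Zn by the identity a*x+(1-a)*x = x: after validating n > 0 it returns True directly.

-- ===== PORT A =====
-- DistortedInt(x, n, a): stores (x % n, a % n, n)  (n > 0 guaranteed inside Pre_)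
def pvDiNew (x n a : Int) : Int × Int × Int := (PySem.Int.mod x n, PySem.Int.mod a n, n)
-- __mul__: new x = a*self.x + (1-a)*other.x, wrapped in DistortedInt
def pvDiMul (p q : Int × Int × Int) : Int × Int × Int :=
  pvDiNew (p.2.1 * p.1 + (1 - p.2.1) * q.1) p.2.2 p.2.1
-- __eq__: compares x, a, n
def pvDiEq (p q : Int × Int × Int) : Bool :=
  p.1 == q.1 && p.2.1 == q.2.1 && p.2.2 == q.2.2
-- the 'for x in range(n)' loop with early return False
def pvALoop (n alpha : Int) : List Int → Bool
  | [] => true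
  | x :: rest =>
      let xdi := pvDiNew x n alpha
      if !(pvDiEq (pvDiMul xdi xdi) xdi) then false
      else pvALoop n alpha rest

def HasDistortedIdempotentProperty (n : Int) (alpha : Int) : Bool :=
  if n ≤ 0 then false  -- A raises ValueError here; excluded by Pre_
  else pvALoop n alpha (PySem.List.pyRange 0 n 1)

-- ===== PORT B =====
def HasDistortedIdempotentProperty_alt (n : Int) (alpha : Int) : Bool :=
  if n ≤ 0 then false  -- B raises ValueError here; excluded by Pre_
  else true

-- ===== PRECONDITION & SPEC =====
-- Pre_ excludes n ≤ 0, where both A and B raise ValueError.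
def Pre_HasDistortedIdempotentProperty (n : Int) (alpha : Int) : Prop := 0 < n
instance (n : Int) (alpha : Int) : Decidable (Pre_HasDistortedIdempotentProperty n alpha) := by
  unfold Pre_HasDistortedIdempotentProperty; infer_instance
def pvWitness_HasDistortedIdempotentProperty : Int × Int := (5, 3)

def Spec_HasDistortedIdempotentProperty (n : Int) (alpha : Int) (out : Bool) : Prop := out = HasDistortedIdempotentProperty_alt n alpha
instance (n : Int) (alpha : Int) (out : Bool) : Decidable (Spec_HasDistortedIdempotentProperty n alpha out) := by unfold Spec_HasDistortedIdempotentProperty; infer_instance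

-- ===== CLAIM (what is proved, stated in full; the proofs are below) =====
def Claim_equal_HasDistortedIdempotentProperty : Prop := ∀ (n : Int) (alpha : Int), Dom_HasDistortedIdempotentProperty n alpha → Pre_HasDistortedIdempotentProperty n alpha → Spec_HasDistortedIdempotentProperty n alpha (HasDistortedIdempotentProperty n alpha)

-- ===== LEMMAS AND PROOFS =====

-- For n > 0, the stored representative is a fixed point of x*x, so the loop check never fires.
lemma pvDiEq_self (n alpha x : Int) (hn : 0 < n) :
    pvDiEq (pvDiMul (pvDiNew x n alpha) (pvDiNew x n alpha)) (pvDiNew x n alpha) = true := by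
  simp only [pvDiNew, pvDiMul, pvDiEq, PySem.Int.mod_eq_emod_of_pos hn]
  have hx : alpha % n * (x % n) + (1 - alpha % n) * (x % n) = x % n := by ring
  simp [hx, Int.emod_emod_of_dvd _ (dvd_refl n)]

lemma pvALoop_true (n alpha : Int) (hn : 0 < n) : ∀ l : List Int, pvALoop n alpha l = true := by
  intro l
  induction l with
  | nil => rfl
  | cons x rest ih => simp [pvALoop, pvDiEq_self n alpha x hn, ih]

-- ===== VERDICT (by name: the statement is the Claim_ definition above) =====
theorem HasDistortedIdempotentProperty_spec : Claim_equal_HasDistortedIdempotentProperty := by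
  intro n alpha _ hpre
  unfold Spec_HasDistortedIdempotentProperty HasDistortedIdempotentProperty HasDistortedIdempotentProperty_alt
  have hn : ¬ n ≤ 0 := by exact not_le.mpr hpre
  simp [hn, pvALoop_true n alpha hpre]
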